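-- pv_equiv track=rewrite | github.com/riccardohhhhzz/ipv6_seedless_address_detection | result/evaluation.py | get_active_num
-- ===== SOURCE A (Python) =====
-- def get_active_num(data):
--     sample_active_num = []
--     active_num_dist = dict()
--     for bgp in data:
--         sample_active_num.append(data[bgp]['active'])
--     # samples = list(range(1,1001))
--     active_num_dist['(0,1e2]'] = 0
--     active_num_dist['(1e2,1e3]'] = 0
--     active_num_dist['(1e3,1e4]'] = 0
--     active_num_dist['(1e4,1e5]'] = 0
--     active_num_dist['(1e5,1e6]'] = 0
--     active_num_dist['(1e6,5e6]'] = 0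
--     for num in sample_active_num:
--         if num>0 and num <=100 : active_num_dist['(0,1e2]'] += 1
--         if num>100 and num <=1000 : active_num_dist['(1e2,1e3]'] += 1
--         if num>1000 and num <=10000 : active_num_dist['(1e3,1e4]'] += 1
--         if num>10000 and num <=100000 : active_num_dist['(1e4,1e5]'] += 1
--         if num>100000 and num <=1000000 : active_num_dist['(1e5,1e6]'] += 1
--         if num>1000000 and num <=5000000 : active_num_dist['(1e6,5e6]'] += 1
--
--     x_groups = list(active_num_dist.keys())
--     y_groups = [active_num_dist[x_groups[i]] for i in range(len(x_groups))]
--     return x_groups, y_groups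
-- ===== SOURCE B (Python) =====
-- def get_active_num(data):
--     labels = ['(0,1e2]', '(1e2,1e3]', '(1e3,1e4]', '(1e4,1e5]', '(1e5,1e6]', '(1e6,5e6]']
--     bounds = [0, 100, 1000, 10000, 100000, 1000000, 5000000]
--     nums = [d['active'] for d in data.values()]
--     # cumulative counts: cum[j] = how many values are <= bounds[j]
--     cum = [sum(1 for v in nums if v <= b) for b in bounds]
--     # bucket (bounds[i], bounds[i+1]] count = difference of adjacent cumulative counts
--     return labels, [cum[i + 1] - cum[i] for i in range(6)]
-- ===== Notes on version B (the rewrite author's own statement) =====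
-- stated objective: alternative
-- what changed: B never assigns any element to a bucket: it computes seven cumulative counts (values <= each boundary, one counting pass per boundary) and obtains each bucket count as the difference of adjacent cumulative counts, instead of A's per-element chain of six range tests updating a counter dict.
import Mathlib
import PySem

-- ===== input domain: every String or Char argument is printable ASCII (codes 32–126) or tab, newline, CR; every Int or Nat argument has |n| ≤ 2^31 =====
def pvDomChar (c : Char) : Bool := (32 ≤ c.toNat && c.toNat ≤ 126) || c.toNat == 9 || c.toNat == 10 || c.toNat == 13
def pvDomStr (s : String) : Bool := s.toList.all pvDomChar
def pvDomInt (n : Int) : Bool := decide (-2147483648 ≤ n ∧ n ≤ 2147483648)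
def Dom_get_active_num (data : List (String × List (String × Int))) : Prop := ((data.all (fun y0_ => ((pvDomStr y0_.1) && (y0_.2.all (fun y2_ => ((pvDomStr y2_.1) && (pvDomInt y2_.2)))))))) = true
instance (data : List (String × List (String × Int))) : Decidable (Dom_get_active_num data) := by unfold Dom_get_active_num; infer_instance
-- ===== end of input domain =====

-- B replaces A's per-element chain of six range tests on a counter dict by seven cumulative
-- counting passes (values ≤ each boundary) whose adjacent differences are the bucket counts;
-- return value only, no mutation.

set_option maxHeartbeats 2000000

-- ===== PORT A =====
-- 'for num: six independent "if lo < num <= hi: dist[label] += 1" updates' (dist[k] += 1 is Dict.modify; the key is always present)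
def pvStepA (d : PySem.Dict String Int) (num : Int) : PySem.Dict String Int :=
  let d := if num > 0 ∧ num ≤ 100 then d.modify "(0,1e2]" 0 (· + 1) else d
  let d := if num > 100 ∧ num ≤ 1000 then d.modify "(1e2,1e3]" 0 (· + 1) else d
  let d := if num > 1000 ∧ num ≤ 10000 then d.modify "(1e3,1e4]" 0 (· + 1) else d
  let d := if num > 10000 ∧ num ≤ 100000 then d.modify "(1e4,1e5]" 0 (· + 1) else d
  let d := if num > 100000 ∧ num ≤ 1000000 then d.modify "(1e5,1e6]" 0 (· + 1) else d
  let d := if num > 1000000 ∧ num ≤ 5000000 then d.modify "(1e6,5e6]" 0 (· + 1) else d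
  d

def get_active_num (data : List (String × List (String × Int))) : List String × List Int :=
  -- for bgp in data: sample_active_num.append(data[bgp]['active'])  (getD defaults stand for KeyError, excluded by Pre_)
  let sample : List Int := ((PySem.Dict.mk data).keys).foldl
    (fun acc bgp =>
      acc ++ [((PySem.Dict.mk (((PySem.Dict.mk data).get? bgp).getD [])).get? "active").getD 0]) []
  let dist0 : PySem.Dict String Int :=
    ((((((PySem.Dict.empty.insert "(0,1e2]" 0).insert "(1e2,1e3]" 0).insert "(1e3,1e4]" 0).insert
        "(1e4,1e5]" 0).insert "(1e5,1e6]" 0).insert "(1e6,5e6]" 0)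
  let dist := sample.foldl pvStepA dist0
  let x_groups := dist.keys
  let y_groups := (PySem.List.pyRange 0 (x_groups.length : Int) 1).map
    (fun i => (dist.get? ((PySem.List.pyGet? x_groups i).getD "")).getD 0)
  (x_groups, y_groups)

-- ===== PORT B =====
-- cum[j] = sum(1 for v in nums if v <= b)  (one counting pass per boundary)
def pvCntLe (nums : List Int) (b : Int) : Int :=
  nums.foldl (fun acc v => if v ≤ b then acc + 1 else acc) 0

def get_active_num_alt (data : List (String × List (String × Int))) : List String × List Int :=
  let labels := ["(0,1e2]", "(1e2,1e3]", "(1e3,1e4]", "(1e4,1e5]", "(1e5,1e6]", "(1e6,5e6]"]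
  let bounds : List Int := [0, 100, 1000, 10000, 100000, 1000000, 5000000]
  -- nums = [d['active'] for d in data.values()]
  let nums : List Int := ((PySem.Dict.mk data).values).map
    (fun d => ((PySem.Dict.mk d).get? "active").getD 0)
  let cum : List Int := bounds.map (pvCntLe nums)
  -- [cum[i+1] - cum[i] for i in range(6)]
  let counts := (PySem.List.pyRange 0 6 1).map
    (fun i => ((PySem.List.pyGet? cum (i + 1)).getD 0) - ((PySem.List.pyGet? cum i).getD 0))
  (labels, counts)

-- ===== PRECONDITION & SPEC =====
-- Pre_ excludes (a) inner dicts without the key 'active', on which A (and B) raise KeyError, and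
-- (b) assoc lists with duplicate outer or inner keys, whose meaning as a Python dict is ambiguous
-- (Python collapses duplicates before the function runs, so both programs see the same collapsed
-- dict and agree; the assoc-list first-match reading is a representation artefact).
def Pre_get_active_num (data : List (String × List (String × Int))) : Prop :=
  (data.map (fun p => p.1)).Nodup ∧
  ∀ p ∈ data, (p.2.map (fun q => q.1)).Nodup ∧ "active" ∈ p.2.map (fun q => q.1)
instance (data : List (String × List (String × Int))) : Decidable (Pre_get_active_num data) := by
  unfold Pre_get_active_num; infer_instance

def pvWitness_get_active_num : (List (String × List (String × Int))) :=
  [("a", [("active", 5)]), ("b", [("active", 200), ("x", 1)])]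

def Spec_get_active_num (data : List (String × List (String × Int))) (out : List String × List Int) : Prop := out = get_active_num_alt data
instance (data : List (String × List (String × Int))) (out : List String × List Int) : Decidable (Spec_get_active_num data out) := by unfold Spec_get_active_num; infer_instance

-- ===== CLAIM (what is proved, stated in full; the proofs are below) =====
def Claim_equal_get_active_num : Prop := ∀ (data : List (String × List (String × Int))), Dom_get_active_num data → Pre_get_active_num data → Spec_get_active_num data (get_active_num data)

-- ===== LEMMAS AND PROOFS =====

-- the six-bucket dict with given counts, in A's insertion order
def pvD6 (c0 c1 c2 c3 c4 c5 : Int) : PySem.Dict String Int :=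
  PySem.Dict.mk [("(0,1e2]",c0),("(1e2,1e3]",c1),("(1e3,1e4]",c2),("(1e4,1e5]",c3),("(1e5,1e6]",c4),("(1e6,5e6]",c5)]

theorem pvStepA_eq (c0 c1 c2 c3 c4 c5 num : Int) :
    pvStepA (pvD6 c0 c1 c2 c3 c4 c5) num =
      pvD6 (if num > 0 ∧ num ≤ 100 then c0+1 else c0)
           (if num > 100 ∧ num ≤ 1000 then c1+1 else c1)
           (if num > 1000 ∧ num ≤ 10000 then c2+1 else c2)
           (if num > 10000 ∧ num ≤ 100000 then c3+1 else c3)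
           (if num > 100000 ∧ num ≤ 1000000 then c4+1 else c4)
           (if num > 1000000 ∧ num ≤ 5000000 then c5+1 else c5) := by
  unfold pvStepA pvD6
  split_ifs <;> rfl

theorem pvCntLe_shift (b a : Int) (l : List Int) :
    l.foldl (fun acc v => if v ≤ b then acc + 1 else acc) a = a + pvCntLe l b := by
  induction l generalizing a with
  | nil => simp [pvCntLe]
  | cons y t ih =>
    simp only [List.foldl_cons]
    rw [ih]
    rw [show pvCntLe (y :: t) b = (if y ≤ b then (0:Int) + 1 else 0) + pvCntLe t b from by
      unfold pvCntLe; rw [List.foldl_cons, ih]; rfl]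
    split_ifs <;> omega

theorem pvCntLe_cons (x : Int) (l : List Int) (b : Int) :
    pvCntLe (x :: l) b = (if x ≤ b then 1 else 0) + pvCntLe l b := by
  rw [show pvCntLe (x :: l) b = (if x ≤ b then (0:Int) + 1 else 0) + pvCntLe l b from by
    unfold pvCntLe; rw [List.foldl_cons, pvCntLe_shift]; rfl]
  split_ifs <;> omega

-- A's fold over the sample list equals the differences of adjacent cumulative counts
theorem pvFoldA_cnt (l : List Int) (c0 c1 c2 c3 c4 c5 : Int) :
    l.foldl pvStepA (pvD6 c0 c1 c2 c3 c4 c5) =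
      pvD6 (c0 + (pvCntLe l 100 - pvCntLe l 0))
           (c1 + (pvCntLe l 1000 - pvCntLe l 100))
           (c2 + (pvCntLe l 10000 - pvCntLe l 1000))
           (c3 + (pvCntLe l 100000 - pvCntLe l 10000))
           (c4 + (pvCntLe l 1000000 - pvCntLe l 100000))
           (c5 + (pvCntLe l 5000000 - pvCntLe l 1000000)) := by
  induction l generalizing c0 c1 c2 c3 c4 c5 with
  | nil => simp [pvCntLe]
  | cons x t ih =>
    rw [List.foldl_cons, pvStepA_eq, ih]
    simp only [pvCntLe_cons]
    have h0 : (if x > 0 ∧ x ≤ 100 then c0+1 else c0) + (pvCntLe t 100 - pvCntLe t 0)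
        = c0 + (((if x ≤ 100 then (1:Int) else 0) + pvCntLe t 100) - ((if x ≤ 0 then (1:Int) else 0) + pvCntLe t 0)) := by
      split_ifs <;> omega
    have h1 : (if x > 100 ∧ x ≤ 1000 then c1+1 else c1) + (pvCntLe t 1000 - pvCntLe t 100)
        = c1 + (((if x ≤ 1000 then (1:Int) else 0) + pvCntLe t 1000) - ((if x ≤ 100 then (1:Int) else 0) + pvCntLe t 100)) := by
      split_ifs <;> omega
    have h2 : (if x > 1000 ∧ x ≤ 10000 then c2+1 else c2) + (pvCntLe t 10000 - pvCntLe t 1000)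
        = c2 + (((if x ≤ 10000 then (1:Int) else 0) + pvCntLe t 10000) - ((if x ≤ 1000 then (1:Int) else 0) + pvCntLe t 1000)) := by
      split_ifs <;> omega
    have h3 : (if x > 10000 ∧ x ≤ 100000 then c3+1 else c3) + (pvCntLe t 100000 - pvCntLe t 10000)
        = c3 + (((if x ≤ 100000 then (1:Int) else 0) + pvCntLe t 100000) - ((if x ≤ 10000 then (1:Int) else 0) + pvCntLe t 10000)) := by
      split_ifs <;> omega
    have h4 : (if x > 100000 ∧ x ≤ 1000000 then c4+1 else c4) + (pvCntLe t 1000000 - pvCntLe t 100000)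
        = c4 + (((if x ≤ 1000000 then (1:Int) else 0) + pvCntLe t 1000000) - ((if x ≤ 100000 then (1:Int) else 0) + pvCntLe t 100000)) := by
      split_ifs <;> omega
    have h5 : (if x > 1000000 ∧ x ≤ 5000000 then c5+1 else c5) + (pvCntLe t 5000000 - pvCntLe t 1000000)
        = c5 + (((if x ≤ 5000000 then (1:Int) else 0) + pvCntLe t 5000000) - ((if x ≤ 1000000 then (1:Int) else 0) + pvCntLe t 1000000)) := by
      split_ifs <;> omega
    rw [h0, h1, h2, h3, h4, h5]

-- A's key/lookup extraction on the six-bucket dict yields the labels and the raw counts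
theorem pvExtract (e0 e1 e2 e3 e4 e5 : Int) :
    ((pvD6 e0 e1 e2 e3 e4 e5).keys,
      (PySem.List.pyRange 0 (((pvD6 e0 e1 e2 e3 e4 e5).keys).length : Int) 1).map
        (fun i => ((pvD6 e0 e1 e2 e3 e4 e5).get? ((PySem.List.pyGet? (pvD6 e0 e1 e2 e3 e4 e5).keys i).getD "")).getD 0))
    = (["(0,1e2]", "(1e2,1e3]", "(1e3,1e4]", "(1e4,1e5]", "(1e5,1e6]", "(1e6,5e6]"], [e0,e1,e2,e3,e4,e5]) := by
  simp [pvD6, PySem.Dict.keys, PySem.Dict.get?, PySem.List.pyGet?, PySem.List.pyIdx?,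
        PySem.List.pyRange, show List.range 6 = [0,1,2,3,4,5] from rfl]

-- B's difference-of-cumulative-counts list, evaluated on the literal boundary table
theorem pvCountsB (nums : List Int) :
    (PySem.List.pyRange 0 6 1).map
      (fun i => ((PySem.List.pyGet? (([0, 100, 1000, 10000, 100000, 1000000, 5000000] : List Int).map (pvCntLe nums)) (i + 1)).getD 0)
        - ((PySem.List.pyGet? (([0, 100, 1000, 10000, 100000, 1000000, 5000000] : List Int).map (pvCntLe nums)) i).getD 0))
    = [pvCntLe nums 100 - pvCntLe nums 0,
       pvCntLe nums 1000 - pvCntLe nums 100,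
       pvCntLe nums 10000 - pvCntLe nums 1000,
       pvCntLe nums 100000 - pvCntLe nums 10000,
       pvCntLe nums 1000000 - pvCntLe nums 100000,
       pvCntLe nums 5000000 - pvCntLe nums 1000000] := by
  simp [PySem.List.pyGet?, PySem.List.pyIdx?, PySem.List.pyRange,
        show List.range 6 = [0,1,2,3,4,5] from rfl]

-- ===== VERDICT (by name: the statement is the Claim_ definition above) =====
theorem get_active_num_spec : Claim_equal_get_active_num := by
  intro data _hdom hpre
  obtain ⟨hnd, hinner⟩ := hpre
  unfold Spec_get_active_num get_active_num get_active_num_alt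
  have hkeys : (PySem.Dict.mk data).keys = data.map (fun p => p.1) := by
    simp [PySem.Dict.keys]
  have hvals : (PySem.Dict.mk data).values = data.map (fun p => p.2) := by
    simp [PySem.Dict.values]
  -- A's sample list equals B's nums list (both read each inner dict's 'active')
  have hsample :
      ((PySem.Dict.mk data).keys).foldl
        (fun acc bgp =>
          acc ++ [((PySem.Dict.mk (((PySem.Dict.mk data).get? bgp).getD [])).get? "active").getD 0]) []
      = data.map (fun p => ((PySem.Dict.mk p.2).get? "active").getD 0) := by
    rw [PySem.List.foldl_append_singleton_eq_map, hkeys, List.map_map]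
    refine List.map_congr_left ?_
    intro p hp
    have hget : (PySem.Dict.mk data).get? p.1 = some p.2 := by
      apply PySem.Dict.get?_of_mem_items
      · exact hp
      · rw [show (PySem.Dict.mk data).keys = data.map (fun p => p.1) from hkeys]; exact hnd
    simp [Function.comp, hget]
  have hd0 : (((((PySem.Dict.empty.insert "(0,1e2]" (0:Int)).insert "(1e2,1e3]" 0).insert "(1e3,1e4]" 0).insert
        "(1e4,1e5]" 0).insert "(1e5,1e6]" 0).insert "(1e6,5e6]" 0 = pvD6 0 0 0 0 0 0 := rfl
  simp only [hsample, hvals, List.map_map, Function.comp_def, hd0, pvFoldA_cnt, pvCountsB,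
    pvExtract, zero_add]
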